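-- pv_equiv track=rewrite | github.com/dream523/wmj.github.io | 专利产权大数据/tech_map.py | is_ustr
-- ===== SOURCE A (Python) =====
-- def is_ustr(in_str):
--     out_str=''
--     for i in range(len(in_str)):
--         if is_uchar(in_str[i]):
--             out_str=out_str+in_str[i]
--         else:
--             out_str=out_str+' '
--     return out_str
--
-- def is_uchar(uchar):
--     """判断一个unicode是否是汉字"""
--     if uchar >= u'\u4e00' and uchar<=u'\u9fa5':
--             return False
--     """判断一个unicode是否是数字"""
--     if uchar >= u'\u0030' and uchar<=u'\u0039':
--             return False
--     """判断一个unicode是否是英文字母"""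
--     if (uchar >= u'\u0041' and uchar<=u'\u005a') or (uchar >= u'\u0061' and uchar<=u'\u007a'):
--             return True
--     if uchar in ('-'):
--             return False
--     return False
-- ===== SOURCE B (Python) =====
-- def is_ustr(in_str):
--     # Run-based two-pointer scan: copy maximal letter runs as slices,
--     # emit a block of spaces for each maximal non-letter run.
--     out = []
--     i = 0
--     n = len(in_str)
--     while i < n:
--         first = _is_letter(in_str[i])
--         j = i + 1
--         while j < n and _is_letter(in_str[j]) == first:
--             j += 1
--         out.append(in_str[i:j] if first else ' ' * (j - i))
--         i = j
--     return ''.join(out)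
--
-- def _is_letter(c):
--     return 'A' <= c <= 'Z' or 'a' <= c <= 'z'
-- ===== Notes on version B (the rewrite author's own statement) =====
-- stated objective: alternative
-- what changed: Replaces A's character-at-a-time indexed loop with repeated string concatenation by a run-based two-pointer scan: it finds maximal runs of letters / non-letters, copies letter runs as whole slices and emits a space block per non-letter run, joining the pieces at the end.
import Mathlib
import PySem

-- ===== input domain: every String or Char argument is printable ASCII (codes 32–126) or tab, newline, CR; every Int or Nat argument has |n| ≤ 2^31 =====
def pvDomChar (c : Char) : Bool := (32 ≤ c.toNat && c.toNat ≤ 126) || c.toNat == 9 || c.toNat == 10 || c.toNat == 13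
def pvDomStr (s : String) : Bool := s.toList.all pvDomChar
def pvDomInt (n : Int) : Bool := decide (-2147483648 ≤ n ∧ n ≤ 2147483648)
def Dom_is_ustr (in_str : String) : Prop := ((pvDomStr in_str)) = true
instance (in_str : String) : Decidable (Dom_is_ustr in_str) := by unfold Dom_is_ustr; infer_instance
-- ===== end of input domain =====

-- B: run-based two-pointer scan (maximal letter/non-letter runs, copied as slices / space blocks) instead of A's per-character concat loop; alternative structure, same cost.


-- ===== PORT A =====
def is_uchar (uchar : Char) : Bool :=
  if '\u4e00' ≤ uchar ∧ uchar ≤ '\u9fa5' then false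
  else if '0' ≤ uchar ∧ uchar ≤ '9' then false
  else if ('A' ≤ uchar ∧ uchar ≤ 'Z') ∨ ('a' ≤ uchar ∧ uchar ≤ 'z') then true
  else if uchar = '-' then false
  else false

def is_ustr (in_str : String) : String :=
  String.ofList ((PySem.List.pyRange 0 (PySem.Str.len in_str) 1).foldl
    (fun out_str i =>
      let c := PySem.List.pyGetD in_str.toList i ' '
      if is_uchar c then out_str ++ [c] else out_str ++ [' ']) [])

-- ===== PORT B =====
def pvIsLetter (c : Char) : Bool := ('A' ≤ c && c ≤ 'Z') || ('a' ≤ c && c ≤ 'z')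

-- inner while loop of Source B: length of the maximal run (after the first char) of chars whose letter-status equals `b`
def pvRun (b : Bool) : List Char → Nat
  | [] => 0
  | c :: t => if pvIsLetter c = b then pvRun b t + 1 else 0

-- outer while loop of Source B: one run per step, letter runs copied as slices, non-letter runs as space blocks
def pvScan : List Char → List Char
  | [] => []
  | c :: t =>
      let b := pvIsLetter c
      let k := pvRun b t
      (if b then c :: t.take k else List.replicate (k + 1) ' ') ++ pvScan (t.drop k)
termination_by l => l.length
decreasing_by simp

def is_ustr_alt (in_str : String) : String :=
  String.ofList (pvScan in_str.toList)

-- ===== PRECONDITION & SPEC =====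
def Spec_is_ustr (in_str : String) (out : String) : Prop := out = is_ustr_alt in_str
instance (in_str : String) (out : String) : Decidable (Spec_is_ustr in_str out) := by unfold Spec_is_ustr; infer_instance

-- ===== CLAIM (what is proved, stated in full; the proofs are below) =====
def Claim_equal_is_ustr : Prop := ∀ (in_str : String), Dom_is_ustr in_str → Spec_is_ustr in_str (is_ustr in_str)

-- ===== LEMMAS AND PROOFS =====

def pvF (c : Char) : Char := if pvIsLetter c then c else ' '

lemma point_eq (c : Char) : (if is_uchar c then c else ' ') = pvF c := by
  have hle : ∀ a b : Char, a ≤ b ↔ a.toNat ≤ b.toNat := fun a b => Iff.rfl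
  simp only [is_uchar, pvF, pvIsLetter, hle]
  split_ifs with h1 h2 h3 <;> simp_all <;> omega

lemma map_take_run (b : Bool) (t : List Char) :
    (t.take (pvRun b t)).map pvF =
      (if b then t.take (pvRun b t) else List.replicate (pvRun b t) ' ') := by
  induction t with
  | nil => simp [pvRun]
  | cons c t ih =>
    rw [pvRun]
    by_cases h : pvIsLetter c = b
    · rw [if_pos h, List.take_succ_cons, List.map_cons, ih]
      cases b
      · simp [pvF, h, List.replicate_succ]
      · simp [pvF, h]
    · rw [if_neg h]; simp

lemma pvScan_len_eq_map : ∀ (n : Nat) (l : List Char), l.length ≤ n → pvScan l = l.map pvF := by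
  intro n
  induction n with
  | zero =>
    intro l hl
    cases l with
    | nil => simp [pvScan]
    | cons c t => simp at hl
  | succ n ih =>
    intro l hl
    cases l with
    | nil => simp [pvScan]
    | cons c t =>
      rw [pvScan]
      have hk : (t.drop (pvRun (pvIsLetter c) t)).length ≤ n := by
        simp only [List.length_cons] at hl
        simp only [List.length_drop]
        omega
      rw [ih _ hk]
      conv_rhs => rw [show (c :: t) = c :: (t.take (pvRun (pvIsLetter c) t) ++ t.drop (pvRun (pvIsLetter c) t)) by simp]
      rw [List.map_cons, List.map_append, ← List.cons_append]
      congr 1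
      have hmt := map_take_run (pvIsLetter c) t
      by_cases h : pvIsLetter c = true
      · rw [h] at hmt
        simp [h, pvF, hmt]
      · simp only [Bool.not_eq_true] at h
        rw [h] at hmt
        simp only [Bool.false_eq_true, if_neg (by simp : ¬False)] at hmt
        simp [h, pvF, hmt, List.replicate_succ]

lemma pvScan_eq_map (l : List Char) : pvScan l = l.map pvF :=
  pvScan_len_eq_map l.length l le_rfl

lemma foldl_eq_map (l : List Char) (acc : List Char) :
    l.foldl (fun out_str c => if is_uchar c then out_str ++ [c] else out_str ++ [' ']) acc
      = acc ++ l.map pvF := by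
  induction l generalizing acc with
  | nil => simp
  | cons c t ih =>
    simp only [List.foldl_cons, List.map_cons]
    rw [show (if is_uchar c then acc ++ [c] else acc ++ [' ']) = acc ++ [pvF c] by
      rw [← point_eq c]; split <;> rfl]
    rw [ih]; simp

-- ===== VERDICT (by name: the statement is the Claim_ definition above) =====
theorem is_ustr_spec : Claim_equal_is_ustr := by
  intro s _
  unfold Spec_is_ustr is_ustr is_ustr_alt
  rw [PySem.Str.len_eq, PySem.List.foldl_pyRange_zero_pyGetD' s.toList ' '
    (fun out_str c => if is_uchar c then out_str ++ [c] else out_str ++ [' ']) []]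
  rw [foldl_eq_map, pvScan_eq_map]
  simp
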